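-- pv_equiv track=rewrite | github.com/mukbaniani/python-edabit-problems | hard.py | snakefill
-- ===== SOURCE A (Python) =====
-- def snakefill(n):
-- 	size = n * n
-- 	snake_size = 1
-- 	result = 0
-- 	for i in range(size):
-- 		snake_size *= 2
-- 		if snake_size > size:
-- 			break
-- 		else:
-- 			result += 1
-- 	return result
-- ===== SOURCE B (Python) =====
-- def snakefill(n):
-- 	size = n * n
-- 	return size.bit_length() - 1 if size else 0
-- ===== Notes on version B (the rewrite author's own statement) =====
-- stated objective: simpler
-- what changed: Replaces the doubling loop with a closed-form bit operation: the result is the highest-set-bit position of the square (bit_length minus one), with the empty-square case returned directly.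
import Mathlib
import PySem

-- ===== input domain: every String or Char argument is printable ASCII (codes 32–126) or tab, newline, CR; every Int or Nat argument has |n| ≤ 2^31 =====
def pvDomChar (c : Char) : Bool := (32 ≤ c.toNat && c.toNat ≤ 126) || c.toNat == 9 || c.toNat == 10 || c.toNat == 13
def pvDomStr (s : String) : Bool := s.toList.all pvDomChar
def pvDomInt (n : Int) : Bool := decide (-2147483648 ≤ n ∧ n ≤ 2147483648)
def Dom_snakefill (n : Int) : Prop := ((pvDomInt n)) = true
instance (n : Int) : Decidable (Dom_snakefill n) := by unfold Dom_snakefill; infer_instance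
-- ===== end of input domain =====

-- B replaces A's doubling loop by the closed form bit_length of the square minus one; same value, no loop.
-- ===== PORT A =====
-- the 'for i in range(size): snake_size *= 2; if snake_size > size: break; else: result += 1' loop,
-- as structural recursion on the remaining iteration count
def snakefillLoop (size : Int) : Nat → Int → Int → Int
  | 0, _, result => result
  | fuel + 1, snake_size, result =>
    let snake_size' := snake_size * 2
    if snake_size' > size then result
    else snakefillLoop size fuel snake_size' (result + 1)

def snakefill (n : Int) : Int :=
  let size := n * n
  snakefillLoop size size.toNat 1 0

-- ===== PORT B =====
-- int.bit_length() is ported as Nat.size (number of bits); size is n*n ≥ 0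
def snakefill_alt (n : Int) : Int :=
  let size := n * n
  if size ≠ 0 then (size.toNat.size : Int) - 1 else 0

-- ===== PRECONDITION & SPEC =====
def Spec_snakefill (n : Int) (out : Int) : Prop := out = snakefill_alt n
instance (n : Int) (out : Int) : Decidable (Spec_snakefill n out) := by unfold Spec_snakefill; infer_instance

-- ===== CLAIM (what is proved, stated in full; the proofs are below) =====
def Claim_equal_snakefill : Prop := ∀ (n : Int), Dom_snakefill n → Spec_snakefill n (snakefill n)

-- ===== LEMMAS AND PROOFS =====

-- casts between the Int inequalities of the loop and the Nat inequalities Nat.size speaks about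
theorem pow_le_toNat {size : Int} {j : Nat} (h : (2 : Int) ^ j ≤ size) :
    2 ^ j ≤ size.toNat := by
  have h' : (((2 : Nat) ^ j : Nat) : Int) ≤ size := by push_cast; exact h
  have := Int.toNat_le_toNat h'
  rwa [Int.toNat_natCast] at this

theorem toNat_lt_pow {size : Int} {j : Nat} (h : size < (2 : Int) ^ j) :
    size.toNat < 2 ^ j := by
  have h' : size < (((2 : Nat) ^ j : Nat) : Int) := by push_cast; exact h
  exact (Int.toNat_lt' (by positivity)).mpr h'

-- Invariant of A's loop: after j successful doublings the snake size is 2^j and result is j;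
-- the loop stops exactly when 2^(j+1) > size, i.e. at j = size.toNat.size - 1.
theorem snakefillLoop_spec (size : Int) :
    ∀ (fuel j : Nat), ((2 : Int) ^ j ≤ size) → size.toNat.size ≤ fuel + j + 1 →
      snakefillLoop size fuel ((2 : Int) ^ j) (j : Int) = (size.toNat.size : Int) - 1 := by
  intro fuel
  induction fuel with
  | zero =>
    intro j h2 hf
    have hj1 : j < size.toNat.size := Nat.lt_size.mpr (pow_le_toNat h2)
    simp only [snakefillLoop]
    have : size.toNat.size = j + 1 := by omega
    rw [this]; push_cast; ring
  | succ fuel ih =>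
    intro j h2 hf
    simp only [snakefillLoop]
    split
    · -- 2^j * 2 > size : loop stops, result is j; show j = size.toNat.size - 1
      rename_i hgt
      have hlt : size < (2 : Int) ^ (j + 1) := by
        have : (2 : Int) ^ j * 2 = 2 ^ (j + 1) := by ring
        omega
      have h1 : size.toNat.size ≤ j + 1 := Nat.size_le.mpr (toNat_lt_pow hlt)
      have h2' : j < size.toNat.size := Nat.lt_size.mpr (pow_le_toNat h2)
      have : size.toNat.size = j + 1 := by omega
      rw [this]; push_cast; ring
    · rename_i hle
      push Not at hle
      have h2' : (2 : Int) ^ (j + 1) ≤ size := by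
        have : (2 : Int) ^ j * 2 = 2 ^ (j + 1) := by ring
        omega
      have := ih (j + 1) h2' (by omega)
      have hpow : (2 : Int) ^ j * 2 = 2 ^ (j + 1) := by ring
      have hres : ((j : Int) + 1) = ((j + 1 : Nat) : Int) := by push_cast; ring
      rw [hpow, hres]
      exact this

-- ===== VERDICT (by name: the statement is the Claim_ definition above) =====
theorem snakefill_spec : Claim_equal_snakefill := by
  intro n _
  unfold Spec_snakefill snakefill snakefill_alt
  by_cases h0 : n = 0
  · subst h0; decide
  · have hs : 1 ≤ n * n := by have := mul_self_pos.mpr h0; linarith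
    have hfuel : (n * n).toNat.size ≤ (n * n).toNat + 0 + 1 := by
      have := Nat.size_le.mpr (Nat.lt_two_pow_self (n := (n * n).toNat))
      omega
    have hne : n * n ≠ 0 := mul_ne_zero h0 h0
    have := snakefillLoop_spec (n * n) (n * n).toNat 0 (by simpa using hs) hfuel
    simp only [pow_zero, Nat.cast_zero] at this
    simp [hne, this]
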